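-- pv_equiv track=rewrite | github.com/chemouna/AlgorithmsPy | src/com/mounacheikhna/algorithms/numbers/NumberPuzzle.py | solution
-- ===== SOURCE A (Python) =====
-- def solution(n):
--     Q = [(k, 1, {k}) for k in list(range(1, 10))]
--     while Q:
--         k, div, s = Q.pop()
--         if k % div == 0:
--             if div == n:
--                 yield k
--             else:
--                 Q += [(10 * k + m, div + 1, s | {m})
--                       for m in range(10) if m not in s]
--     return Q
-- ===== SOURCE B (Python) =====
-- def solution(n):
--     level = [(k, frozenset((k,))) for k in range(9, 0, -1)]
--     div = 1
--     while level and div != n: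
--         level = [(10 * k + m, s | {m})
--                  for (k, s) in level if k % div == 0
--                  for m in range(9, -1, -1) if m not in s]
--         div += 1
--     if div == n:
--         for k, s in level:
--             if k % div == 0:
--                 yield k
-- ===== Notes on version B (the rewrite author's own statement) =====
-- stated objective: alternative
-- what changed: Replaced the explicit LIFO work stack with a breadth-first level-by-level construction: the set of divisible prefixes of each length is rebuilt by one list comprehension per digit position (descending digit order keeps the exact yield order), instead of popping and pushing individual nodes.
import Mathlib
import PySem

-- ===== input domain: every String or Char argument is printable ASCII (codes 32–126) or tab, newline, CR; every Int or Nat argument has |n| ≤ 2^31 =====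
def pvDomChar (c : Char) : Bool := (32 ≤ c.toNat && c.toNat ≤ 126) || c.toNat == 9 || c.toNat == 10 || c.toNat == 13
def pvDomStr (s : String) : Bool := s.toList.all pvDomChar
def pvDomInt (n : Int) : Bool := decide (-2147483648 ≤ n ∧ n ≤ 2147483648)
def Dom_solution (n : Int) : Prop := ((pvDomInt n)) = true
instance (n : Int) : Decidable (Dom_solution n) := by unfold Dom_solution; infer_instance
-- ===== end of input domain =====

-- B replaces A's explicit LIFO work stack by a breadth-first, level-by-level rebuild of the
-- list of divisible distinct-digit prefixes, one comprehension per digit position, with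
-- descending digit order so the yield order is identical (objective: alternative decomposition;
-- the generators' yields are returned as a list).

-- Termination measure, shared by both ports: number of digits 0..9 not yet used.
def pvFree (s : PySem.Set Int) : Nat :=
  ((PySem.List.pyRange 0 10 1).filter (fun m => !(PySem.Set.contains s m))).length

-- subtree-size weight for the stack potential
def pvW : Nat → Nat
  | 0 => 1
  | f + 1 => 1 + (f + 1) * pvW f

def pvPot (Q : List (Int × Int × PySem.Set Int)) : Nat :=
  (Q.map (fun t => pvW (pvFree t.2.2))).sum

lemma pvFilter_mem_length {l : List Int} (hl : l.Nodup) {p : Int → Bool} {m : Int}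
    (hm : m ∈ l) (hp : p m = true) :
    (l.filter (fun x => p x && !(x == m))).length + 1 = (l.filter p).length := by
  induction l with
  | nil => cases hm
  | cons a l ih =>
    rcases List.mem_cons.mp hm with rfl | hm'
    · have hnot : m ∉ l := (List.nodup_cons.mp hl).1
      have : l.filter (fun x => p x && !(x == m)) = l.filter p := by
        apply List.filter_congr
        intro x hx
        have : (x == m) = false := beq_eq_false_iff_ne.mpr (by rintro rfl; exact hnot hx)
        simp [this]
      simp [hp, this]
    · have hl' : l.Nodup := (List.nodup_cons.mp hl).2
      by_cases hpa : p a = true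
      · by_cases ham : (a == m) = true
        · have : a = m := beq_iff_eq.mp ham
          subst this
          exact absurd hm' (List.nodup_cons.mp hl).1
        · have ham' : (a == m) = false := by simpa using ham
          simp [hpa, ham', ih hl' hm']
      · have hpa' : p a = false := by simpa using hpa
        simp [hpa', ih hl' hm']

lemma pvFree_add (s : PySem.Set Int) (m : Int) (h0 : 0 ≤ m) (h1 : m < 10)
    (hc : PySem.Set.contains s m = false) :
    pvFree (PySem.Set.add s m) + 1 = pvFree s := by
  unfold pvFree
  have hm : m ∉ s := by simpa using hc
  have hadd : PySem.Set.add s m = s ++ [m] := by simp [PySem.Set.add, hm]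
  rw [hadd]
  have hpred : ∀ x : Int, (!(PySem.Set.contains (s ++ [m]) x))
      = ((!(PySem.Set.contains s x)) && !(x == m)) := by
    intro x
    by_cases hx : x = m <;> by_cases hs : x ∈ s <;>
      simp [PySem.Set.contains, hx, hs]
  have : (PySem.List.pyRange 0 10 1).filter (fun x => !(PySem.Set.contains (s ++ [m]) x))
      = (PySem.List.pyRange 0 10 1).filter
          (fun x => (!(PySem.Set.contains s x)) && !(x == m)) := by
    apply List.filter_congr; intro x _; exact hpred x
  rw [this]
  exact pvFilter_mem_length (PySem.List.nodup_pyRange_one 0 10)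
    (PySem.List.mem_pyRange_one.mpr ⟨h0, h1⟩) (by simpa using hc)

-- ===== PORT A =====
-- A's children pushed on the stack for a node (k, div, s)
def pvChildren (k div : Int) (s : PySem.Set Int) : List (Int × Int × PySem.Set Int) :=
  ((PySem.List.pyRange 0 10 1).filter (fun m => !(PySem.Set.contains s m))).map
    (fun m => (10 * k + m, div + 1, PySem.Set.add s m))

lemma pvPot_children_lt (k div : Int) (s : PySem.Set Int) :
    pvPot (pvChildren k div s) < pvW (pvFree s) := by
  unfold pvPot pvChildren
  rw [List.map_map]
  have hconst : ((PySem.List.pyRange 0 10 1).filter (fun m => !(PySem.Set.contains s m))).map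
      ((fun t : Int × Int × PySem.Set Int => pvW (pvFree t.2.2)) ∘
        (fun m => (10 * k + m, div + 1, PySem.Set.add s m)))
      = ((PySem.List.pyRange 0 10 1).filter (fun m => !(PySem.Set.contains s m))).map
          (fun _ => pvW (pvFree s - 1)) := by
    apply List.map_congr_left
    intro m hm
    have hmem := List.mem_filter.mp hm
    have hrange := PySem.List.mem_pyRange_one.mp hmem.1
    have hc : PySem.Set.contains s m = false := by simpa using hmem.2
    have := pvFree_add s m hrange.1 hrange.2 hc
    simp [Function.comp]
    congr 1
    omega
  rw [hconst, List.map_const', List.sum_replicate, smul_eq_mul]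
  have hlen : ((PySem.List.pyRange 0 10 1).filter (fun m => !(PySem.Set.contains s m))).length
      = pvFree s := rfl
  rw [hlen]
  rcases hf : pvFree s with _ | f
  · simp [pvW]
  · have : pvW (f + 1) = 1 + (f + 1) * pvW f := rfl
    have hsub : f + 1 - 1 = f := rfl
    rw [hsub, this]
    omega

lemma pvPot_append (Q R : List (Int × Int × PySem.Set Int)) :
    pvPot (Q ++ R) = pvPot Q + pvPot R := by
  unfold pvPot; simp

lemma pvPot_dropLast {Q : List (Int × Int × PySem.Set Int)} {k div : Int} {s : PySem.Set Int}
    (h : Q.getLast? = some (k, div, s)) :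
    pvPot Q = pvPot Q.dropLast + pvW (pvFree s) := by
  have hne : Q ≠ [] := by intro hQ; simp [hQ] at h
  have hlast : Q.dropLast ++ [(k, div, s)] = Q := by
    have := List.dropLast_append_getLast hne
    rwa [List.getLast_eq_iff_getLast?_eq_some hne |>.mpr h] at this
  calc pvPot Q = pvPot (Q.dropLast ++ [(k, div, s)]) := by rw [hlast]
    _ = pvPot Q.dropLast + pvW (pvFree s) := by rw [pvPot_append]; simp [pvPot]

lemma pvW_pos (f : Nat) : 0 < pvW f := by
  cases f <;> simp [pvW]

-- the while loop over the explicit stack Q (pop() = pop from the end)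
def pvLoop (n : Int) (Q : List (Int × Int × PySem.Set Int)) : List Int :=
  match hQ : Q.getLast? with
  | none => []
  | some (k, div, s) =>
    if PySem.Int.mod k div == 0 then
      if div == n then
        k :: pvLoop n Q.dropLast
      else
        pvLoop n (Q.dropLast ++ pvChildren k div s)
    else
      pvLoop n Q.dropLast
termination_by pvPot Q
decreasing_by
  · rw [pvPot_dropLast hQ]
    have := pvW_pos (pvFree s); omega
  · rw [pvPot_dropLast hQ, pvPot_append]
    have := pvPot_children_lt k div s; omega
  · rw [pvPot_dropLast hQ]
    have := pvW_pos (pvFree s); omega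

def solution (n : Int) : List Int :=
  pvLoop n ((PySem.List.pyRange 1 10 1).map (fun k => (k, 1, PySem.Set.ofList [k])))

-- ===== PORT B =====
-- level-measure for termination of the while loop: max over the level of pvFree + 1
def pvLM (level : List (Int × PySem.Set Int)) : Nat :=
  level.foldr (fun t a => max (pvFree t.2 + 1) a) 0

lemma pvLM_ge {level : List (Int × PySem.Set Int)} {t : Int × PySem.Set Int}
    (h : t ∈ level) : pvFree t.2 + 1 ≤ pvLM level := by
  induction level with
  | nil => cases h
  | cons a l ih =>
    rcases List.mem_cons.mp h with rfl | h'
    · simp [pvLM]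
    · have := ih h'
      simp only [pvLM, List.foldr] at this ⊢
      omega

lemma pvLM_lt_of_forall {level : List (Int × PySem.Set Int)} {c : Nat} (hc : 0 < c)
    (h : ∀ t ∈ level, pvFree t.2 + 1 < c) : pvLM level < c := by
  induction level with
  | nil => simpa [pvLM]
  | cons a l ih =>
    have h1 := h a (List.mem_cons_self)
    have h2 := ih (fun t ht => h t (List.mem_cons_of_mem a ht))
    simp only [pvLM, List.foldr] at h2 ⊢
    omega

-- one call of B's comprehension: extend every divisible prefix by every unused digit, descending
def pvLevelStep (div : Int) (level : List (Int × PySem.Set Int)) : List (Int × PySem.Set Int) :=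
  (level.filter (fun t => PySem.Int.mod t.1 div == 0)).flatMap
    (fun t => ((PySem.List.pyRange 9 (-1) (-1)).filter (fun m => !(PySem.Set.contains t.2 m))).map
      (fun m => (10 * t.1 + m, PySem.Set.add t.2 m)))

lemma pvLM_step_lt {div : Int} {level : List (Int × PySem.Set Int)} (hne : level ≠ []) :
    pvLM (pvLevelStep div level) < pvLM level := by
  have hpos : 0 < pvLM level := by
    cases level with
    | nil => exact absurd rfl hne
    | cons a l => simp only [pvLM, List.foldr]; omega
  apply pvLM_lt_of_forall hpos
  intro t' ht'
  unfold pvLevelStep at ht'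
  obtain ⟨t, ht, hmap⟩ := List.mem_flatMap.mp ht'
  obtain ⟨m, hm, rfl⟩ := List.mem_map.mp hmap
  have hmf := List.mem_filter.mp hm
  have hr := PySem.List.mem_pyRange_neg_one.mp hmf.1
  have hc : PySem.Set.contains t.2 m = false := by simpa using hmf.2
  have hdec := pvFree_add t.2 m (by omega) (by omega) hc
  have hle := pvLM_ge (List.mem_of_mem_filter ht)
  simp only at hdec ⊢
  omega

-- the while loop: rebuild the level for each digit position; at exit, yield if div == n
def pvLevelLoop (n div : Int) (level : List (Int × PySem.Set Int)) : List Int :=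
  if h : level ≠ [] ∧ div ≠ n then
    pvLevelLoop n (div + 1) (pvLevelStep div level)
  else if div == n then
    (level.filter (fun t => PySem.Int.mod t.1 div == 0)).map (fun t => t.1)
  else []
termination_by pvLM level
decreasing_by
  exact pvLM_step_lt h.1

def solution_alt (n : Int) : List Int :=
  pvLevelLoop n 1 ((PySem.List.pyRange 9 0 (-1)).map (fun k => (k, PySem.Set.ofList [k])))

-- ===== PRECONDITION & SPEC =====
def Spec_solution (n : Int) (out : List Int) : Prop := out = solution_alt n
instance (n : Int) (out : List Int) : Decidable (Spec_solution n out) := by unfold Spec_solution; infer_instance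

-- ===== CLAIM (what is proved, stated in full; the proofs are below) =====
def Claim_equal_solution : Prop := ∀ (n : Int), Dom_solution n → Spec_solution n (solution n)

-- ===== LEMMAS AND PROOFS =====

lemma pvFree_add_lt (s : PySem.Set Int) (m : Int) (h0 : 0 ≤ m) (h1 : m < 10)
    (hc : PySem.Set.contains s m = false) :
    pvFree (PySem.Set.add s m) < pvFree s := by
  have := pvFree_add s m h0 h1 hc; omega

-- proof-only bridge: the DFS value of one node; both ports are shown equal to its flatMap
def pvRec (n k div : Int) (s : PySem.Set Int) : List Int :=
  if PySem.Int.mod k div == 0 then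
    if div == n then [k]
    else
      (PySem.List.pyRange 9 (-1) (-1)).attach.flatMap
        (fun ⟨m, _⟩ =>
          if !(PySem.Set.contains s m) then pvRec n (10 * k + m) (div + 1) (PySem.Set.add s m)
          else [])
  else []
termination_by pvFree s
decreasing_by
  rename_i hm _
  have hr := PySem.List.mem_pyRange_neg_one.mp hm
  rename_i hc
  exact pvFree_add_lt s _ (by omega) (by omega) (by simpa using hc)

lemma pvFilter_flatMap {α β : Type} (l : List α) (p : α → Bool) (g : α → List β) :
    (l.filter p).flatMap g = l.flatMap (fun x => if p x then g x else []) := by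
  induction l with
  | nil => rfl
  | cons a l ih =>
    by_cases ha : p a = true
    · simp [ha, ih]
    · have ha' : p a = false := by simpa using ha
      simp [ha', ih]

lemma pvFilter_map_eq_flatMap {α β : Type} (l : List α) (p : α → Bool) (f : α → β) :
    (l.filter p).map f = l.flatMap (fun x => if p x then [f x] else []) := by
  induction l with
  | nil => rfl
  | cons a l ih =>
    by_cases ha : p a = true
    · simp [ha, ih]
    · have ha' : p a = false := by simpa using ha
      simp [ha', ih]

-- expanding one node of A's stack (the child block, in reverse) is B's recursive value there
lemma pvChildren_reverse_flatMap (n k div : Int) (s : PySem.Set Int)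
    (h1 : (PySem.Int.mod k div == 0) = true) (h2 : (div == n) = false) :
    (pvChildren k div s).reverse.flatMap (fun t => pvRec n t.1 t.2.1 t.2.2)
      = pvRec n k div s := by
  rw [pvRec]
  simp only [h1, h2, if_true, if_false, Bool.false_eq_true]
  simp only [List.flatMap_subtype, List.unattach_attach]
  unfold pvChildren
  rw [← List.map_reverse, ← List.filter_reverse, List.flatMap_map]
  have hrev : (PySem.List.pyRange 0 10 1).reverse = PySem.List.pyRange 9 (-1) (-1) := by decide
  rw [hrev, pvFilter_flatMap]

lemma pvReverse_of_getLast? {Q : List (Int × Int × PySem.Set Int)} {x : Int × Int × PySem.Set Int}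
    (h : Q.getLast? = some x) : Q.reverse = x :: Q.dropLast.reverse := by
  have hne : Q ≠ [] := by intro hQ; simp [hQ] at h
  have hlast : Q.dropLast ++ [x] = Q := by
    have := List.dropLast_append_getLast hne
    rwa [List.getLast_eq_iff_getLast?_eq_some hne |>.mpr h] at this
  conv_lhs => rw [← hlast]
  simp

-- A's stack loop computes the DFS values of the reversed stack, concatenated.
lemma pvLoop_eq_flatMap (n : Int) (Q : List (Int × Int × PySem.Set Int)) :
    pvLoop n Q = Q.reverse.flatMap (fun t => pvRec n t.1 t.2.1 t.2.2) := by
  fun_induction pvLoop n Q with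
  | case1 Q hQ =>
    have : Q = [] := List.getLast?_eq_none_iff.mp hQ
    simp [this]
  | case2 Q k div s hQ h1 h2 ih =>
    rw [pvReverse_of_getLast? hQ]
    rw [List.flatMap_cons, ih]
    have : pvRec n k div s = [k] := by rw [pvRec]; simp [h1, h2]
    simp [this]
  | case3 Q k div s hQ h1 h2 ih =>
    rw [pvReverse_of_getLast? hQ, List.flatMap_cons]
    rw [ih, List.reverse_append, List.flatMap_append]
    rw [pvChildren_reverse_flatMap n k div s (by simpa using h1) (by simpa using h2)]
  | case4 Q k div s hQ h1 ih =>
    rw [pvReverse_of_getLast? hQ, List.flatMap_cons, ih]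
    have : pvRec n k div s = [] := by rw [pvRec]; simp [h1]
    simp [this]

-- B's level loop computes the DFS values of the current level, concatenated.
lemma pvLevelLoop_eq_flatMap (n div : Int) (level : List (Int × PySem.Set Int)) :
    pvLevelLoop n div level = level.flatMap (fun t => pvRec n t.1 div t.2) := by
  fun_induction pvLevelLoop n div level with
  | case1 div level h ih =>
    rw [ih]
    unfold pvLevelStep
    rw [List.flatMap_assoc, pvFilter_flatMap]
    apply List.flatMap_congr
    intro t _
    rw [pvRec]
    rcases hmod : (PySem.Int.mod t.1 div == 0) with _ | _
    · simp [hmod]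
    · have hdn : (div == n) = false := beq_eq_false_iff_ne.mpr h.2
      simp only [hmod, hdn, if_true, if_false, Bool.false_eq_true]
      rw [List.flatMap_map]
      simp only [List.flatMap_subtype, List.unattach_attach]
      rw [pvFilter_flatMap]
  | case2 div level h hdn =>
    have hdn' : div = n := beq_iff_eq.mp hdn
    subst hdn'
    rw [pvFilter_map_eq_flatMap]
    apply List.flatMap_congr
    intro t _
    rw [pvRec]
    rcases hmod : (PySem.Int.mod t.1 div == 0) with _ | _ <;> simp [hmod]
  | case3 div level h hdn =>
    have hlv : level = [] := by
      by_contra hne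
      exact h ⟨hne, fun hd => by simp [hd] at hdn⟩
    simp [hlv]

-- ===== VERDICT (by name: the statement is the Claim_ definition above) =====
theorem solution_spec : Claim_equal_solution := by
  unfold Claim_equal_solution
  intro n _
  unfold Spec_solution
  show pvLoop n _ = pvLevelLoop n 1 _
  rw [pvLoop_eq_flatMap, pvLevelLoop_eq_flatMap, ← List.map_reverse, List.flatMap_map,
    List.flatMap_map]
  have hrev : (PySem.List.pyRange 1 10 1).reverse = PySem.List.pyRange 9 0 (-1) := by decide
  rw [hrev]
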